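-- pv_equiv track=rewrite | github.com/aceiii/advent-of-code-2023 | python/day11.py | expand_by_y
-- ===== SOURCE A (Python) =====
-- from operator import itemgetter
--
-- def expand_by_y(galaxies, rows, expansion_amount):
--     galaxies.sort(key=itemgetter(1), reverse=True)
--     while rows:
--         row = rows.pop()
--         for idx in range(len(galaxies)):
--             x, y = galaxies[idx]
--             if y < row:
--                 break
--             galaxies[idx] = (x, y+expansion_amount)
--     return galaxies
-- ===== SOURCE B (Python) =====
-- def expand_by_y(galaxies, rows, expansion_amount):
--     def shift(y):
--         for row in reversed(rows):
--             if y >= row: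
--                 y += expansion_amount
--         return y
--     return [(x, shift(y)) for (x, y) in sorted(galaxies, key=lambda g: g[1], reverse=True)]
-- ===== Notes on version B (the rewrite author's own statement) =====
-- stated objective: alternative
-- what changed: A mutates a shared galaxy list row by row, rescanning the galaxies for every row with an early break; B computes each galaxy's final y independently with one fold over the reversed rows (loop interchange, no mutation, no break) — the proof shows A's break and cumulative in-place updates never change the per-galaxy result when expansion_amount >= 0.
-- outside the precondition, e.g. on expand_by_y([(0, 5), (0, 0)], [0, 5], -10): A returns [(0, -5), (0, 0)], B returns [(0, -5), (0, -10)]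
import Mathlib
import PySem

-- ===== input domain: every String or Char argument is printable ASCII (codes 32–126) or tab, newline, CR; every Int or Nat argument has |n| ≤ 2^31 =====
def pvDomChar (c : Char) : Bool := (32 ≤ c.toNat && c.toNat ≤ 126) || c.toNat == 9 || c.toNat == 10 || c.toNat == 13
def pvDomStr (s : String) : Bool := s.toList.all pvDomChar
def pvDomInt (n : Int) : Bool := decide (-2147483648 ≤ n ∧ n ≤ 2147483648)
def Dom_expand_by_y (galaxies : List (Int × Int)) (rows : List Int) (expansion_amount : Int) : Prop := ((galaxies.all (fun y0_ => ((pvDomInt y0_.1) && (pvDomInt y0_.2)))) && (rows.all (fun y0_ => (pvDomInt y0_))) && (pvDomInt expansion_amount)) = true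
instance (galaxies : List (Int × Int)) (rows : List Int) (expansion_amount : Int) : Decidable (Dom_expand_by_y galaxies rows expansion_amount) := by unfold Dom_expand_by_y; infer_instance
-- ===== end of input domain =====

-- B interchanges A's loops: one independent fold per galaxy instead of A's per-row rescans with
-- mutation and break (objective: alternative decomposition, same asymptotic cost).
-- Return-value equivalence only: Python A sorts `galaxies` in place and empties `rows` via pop();
-- B mutates neither.

-- ===== PORT A =====
-- inner `for idx in range(len(galaxies)) … break`: shift entries from the front until y < row
def pvStepA (row e : Int) : List (Int × Int) → List (Int × Int)
  | [] => []
  | (x, y) :: rest => if y < row then (x, y) :: rest else (x, y + e) :: pvStepA row e rest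

def expand_by_y (galaxies : List (Int × Int)) (rows : List Int) (expansion_amount : Int) : List (Int × Int) :=
  let gs := PySem.List.sorted galaxies (fun g => g.2) true
  -- `while rows: row = rows.pop()` processes rows back to front
  rows.reverse.foldl (fun acc row => pvStepA row expansion_amount acc) gs

-- ===== PORT B =====
def expand_by_y_alt (galaxies : List (Int × Int)) (rows : List Int) (expansion_amount : Int) : List (Int × Int) :=
  let ordered := PySem.List.sorted galaxies (fun g => g.2) true
  ordered.map (fun g =>
    (g.1, rows.reverse.foldl (fun y row => if row ≤ y then y + expansion_amount else y) g.2))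

-- ===== PRECONDITION & SPEC =====
-- Pre_ excludes inputs on which A still returns: a negative expansion_amount, under which shrunk
-- coordinates can fall below later galaxies so A's early break skips galaxies its own comparison
-- would qualify — a processing-order artefact of the in-place loop; the function's purpose is
-- expanding space by a non-negative amount.
def Pre_expand_by_y (galaxies : List (Int × Int)) (rows : List Int) (expansion_amount : Int) : Prop :=
  0 ≤ expansion_amount

instance (galaxies : List (Int × Int)) (rows : List Int) (expansion_amount : Int) : Decidable (Pre_expand_by_y galaxies rows expansion_amount) := by unfold Pre_expand_by_y; infer_instance

def pvWitness_expand_by_y : (List (Int × Int)) × List Int × Int := ([(0, 3), (1, 0), (2, 5)], [4, 1], 2)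

def Spec_expand_by_y (galaxies : List (Int × Int)) (rows : List Int) (expansion_amount : Int) (out : List (Int × Int)) : Prop := out = expand_by_y_alt galaxies rows expansion_amount
instance (galaxies : List (Int × Int)) (rows : List Int) (expansion_amount : Int) (out : List (Int × Int)) : Decidable (Spec_expand_by_y galaxies rows expansion_amount out) := by unfold Spec_expand_by_y; infer_instance

-- ===== CLAIM (what is proved, stated in full; the proofs are below) =====
def Claim_equal_expand_by_y : Prop := ∀ (galaxies : List (Int × Int)) (rows : List Int) (expansion_amount : Int), Dom_expand_by_y galaxies rows expansion_amount → Pre_expand_by_y galaxies rows expansion_amount → Spec_expand_by_y galaxies rows expansion_amount (expand_by_y galaxies rows expansion_amount)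

-- ===== LEMMAS AND PROOFS =====

-- A's inner loop on a y-descending list shifts exactly the galaxies with row ≤ y.
theorem stepA_eq_map (row e : Int) (gs : List (Int × Int))
    (h : List.Pairwise (fun a b => b.2 ≤ a.2) gs) :
    pvStepA row e gs = gs.map (fun g => if row ≤ g.2 then (g.1, g.2 + e) else g) := by
  induction gs with
  | nil => rfl
  | cons g rest ih =>
    obtain ⟨x, y⟩ := g
    rw [List.pairwise_cons] at h
    obtain ⟨h1, h2⟩ := h
    by_cases hy : y < row
    · simp only [pvStepA, if_pos hy, List.map_cons]
      rw [if_neg (by omega)]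
      congr 1
      conv_lhs => rw [← List.map_id rest]
      apply List.map_congr_left
      intro a ha
      have := h1 a ha
      simp only [id]
      rw [if_neg (by simp at this ⊢; omega)]
    · simp only [pvStepA, if_neg hy, List.map_cons]
      rw [if_pos (by omega), ih h2]

-- The shift keeps the list y-descending (e ≥ 0).
theorem pairwise_map_shift (row e : Int) (gs : List (Int × Int)) (he : 0 ≤ e)
    (h : List.Pairwise (fun a b => b.2 ≤ a.2) gs) :
    List.Pairwise (fun a b => b.2 ≤ a.2)
      (gs.map (fun g => if row ≤ g.2 then (g.1, g.2 + e) else g)) := by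
  rw [List.pairwise_map]
  refine h.imp ?_
  intro a b hab
  split_ifs <;> (try dsimp only) <;> omega

-- Loop interchange: A's fold of per-row passes equals one independent fold per galaxy.
theorem foldl_stepA_eq_map_sim (rrows : List Int) (e : Int) (gs : List (Int × Int))
    (he : 0 ≤ e) (hg : List.Pairwise (fun a b => b.2 ≤ a.2) gs) :
    rrows.foldl (fun acc row => pvStepA row e acc) gs
      = gs.map (fun g => (g.1, rrows.foldl (fun y row => if row ≤ y then y + e else y) g.2)) := by
  induction rrows generalizing gs with
  | nil => simp
  | cons r rest ih =>
    rw [List.foldl_cons, stepA_eq_map r e gs hg, ih _ (pairwise_map_shift r e gs he hg),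
      List.map_map]
    apply List.map_congr_left
    intro g _
    simp only [Function.comp, List.foldl_cons]
    by_cases hry : r ≤ g.2
    · simp only [if_pos hry]
    · simp only [if_neg hry]

-- ===== VERDICT (by name: the statement is the Claim_ definition above) =====
theorem expand_by_y_spec : Claim_equal_expand_by_y := by
  intro galaxies rows e _hdom he
  unfold Spec_expand_by_y
  simp only [expand_by_y, expand_by_y_alt]
  exact foldl_stepA_eq_map_sim rows.reverse e _ he
    (PySem.List.sorted_pairwise_rev galaxies (fun g => g.2))
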